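-- pv_equiv track=rewrite | github.com/viperk17/PythonExercises | ProjectEuler/SumofFactorials.py | f
-- ===== SOURCE A (Python) =====
-- def f(n):
--     num_li=[int(i) for i in str(n)]
--     sum_li=[]
--     for num in num_li:
--         value=1
--         for a in range(1,num+1):
--             value=value*a
--         sum_li.append(value)
--     return sum(sum_li)
-- ===== SOURCE B (Python) =====
-- FACT = [1, 1, 2, 6, 24, 120, 720, 5040, 40320, 362880]
--
-- def f(n):
--     return sum(FACT[int(d)] for d in str(n))
-- ===== Notes on version B (the rewrite author's own statement) =====
-- stated objective: simpler
-- what changed: Replaces A's nested per-digit factorial multiplication loop (and the two intermediate lists) with a single pass over str(n) indexing a precomputed factorial table for digits 0-9.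
-- outside the precondition, e.g. on f(-5): A raises ValueError, B raises ValueError
import Mathlib
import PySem

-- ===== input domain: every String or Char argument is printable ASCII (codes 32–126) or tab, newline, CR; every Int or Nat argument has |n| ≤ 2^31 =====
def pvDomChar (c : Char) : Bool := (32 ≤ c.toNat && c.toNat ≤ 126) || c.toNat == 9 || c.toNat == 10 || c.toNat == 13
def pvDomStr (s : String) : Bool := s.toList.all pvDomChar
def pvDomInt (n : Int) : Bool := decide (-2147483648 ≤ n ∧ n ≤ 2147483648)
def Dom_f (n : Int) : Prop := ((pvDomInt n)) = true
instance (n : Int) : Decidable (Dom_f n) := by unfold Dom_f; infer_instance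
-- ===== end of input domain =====

-- B replaces A's nested per-digit factorial loop with one pass indexing a precomputed 0-9 factorial table (objective: simpler).


-- ===== PORT A =====
-- int(i) for a single character, exact on the digit characters '0'..'9' — the only
-- characters of str(n) under Pre_f (n ≥ 0); on other chars Python raises (excluded by Pre_f).
def digitInt (c : Char) : Int := (c.toNat : Int) - 48

def f (n : Int) : Int :=
  -- num_li = [int(i) for i in str(n)]
  let numLi : List Int := (PySem.Int.toStr n).toList.map digitInt
  -- for num in num_li: value = 1; for a in range(1, num+1): value = value*a; sum_li.append(value)
  let sumLi : List Int :=
    numLi.foldl (fun acc num =>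
      acc ++ [(PySem.List.pyRange 1 (num + 1) 1).foldl (fun value a => value * a) 1]) []
  -- return sum(sum_li)
  sumLi.foldl (· + ·) 0

-- ===== PORT B =====
def FACT : List Int := [1, 1, 2, 6, 24, 120, 720, 5040, 40320, 362880]

def f_alt (n : Int) : Int :=
  -- sum(FACT[int(d)] for d in str(n));  FACT[...] is pyGet?, .getD 0 is a totality guard
  -- never hit under Pre_f (int(d) ∈ [0,9] there).
  ((PySem.Int.toStr n).toList.map
    (fun d => (PySem.List.pyGet? FACT (digitInt d)).getD 0)).foldl (· + ·) 0

-- ===== PRECONDITION & SPEC =====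
-- Pre_f excludes negative n, on which both A and B raise ValueError: str(n) starts with '-' and int('-') fails.
def Pre_f (n : Int) : Prop := 0 ≤ n
instance (n : Int) : Decidable (Pre_f n) := by unfold Pre_f; infer_instance
def pvWitness_f : Int := 40585
def Spec_f (n : Int) (out : Int) : Prop := out = f_alt n
instance (n : Int) (out : Int) : Decidable (Spec_f n out) := by unfold Spec_f; infer_instance

-- ===== CLAIM (what is proved, stated in full; the proofs are below) =====
def Claim_equal_f : Prop := ∀ (n : Int), Dom_f n → Pre_f n → Spec_f n (f n)

-- ===== LEMMAS AND PROOFS =====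

-- every character produced by Nat.toDigitsCore in base 10 (onto a digits-only accumulator) is '0'..'9'
theorem toDigitsCore_digits (fuel m : Nat) (acc : List Char)
    (hacc : ∀ c ∈ acc, 48 ≤ c.toNat ∧ c.toNat ≤ 57) :
    ∀ c ∈ Nat.toDigitsCore 10 fuel m acc, 48 ≤ c.toNat ∧ c.toNat ≤ 57 := by
  induction fuel generalizing m acc with
  | zero => simpa [Nat.toDigitsCore] using hacc
  | succ fuel ih =>
    have hd : 48 ≤ (Nat.digitChar (m % 10)).toNat ∧ (Nat.digitChar (m % 10)).toNat ≤ 57 := by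
      have h10 : m % 10 < 10 := Nat.mod_lt _ (by norm_num)
      interval_cases h : (m % 10) <;> simp [Nat.digitChar]
    intro c hc
    rw [Nat.toDigitsCore] at hc
    by_cases h0 : m / 10 = 0
    · simp only [h0, if_true] at hc
      rcases List.mem_cons.mp hc with h | h
      · exact h ▸ hd
      · exact hacc _ h
    · rw [if_neg h0] at hc
      refine ih _ _ ?_ c hc
      intro x hx
      rcases List.mem_cons.mp hx with h | h
      · exact h ▸ hd
      · exact hacc _ h

theorem toStr_digits (n : Int) (hn : 0 ≤ n) :
    ∀ c ∈ (PySem.Int.toStr n).toList, 48 ≤ c.toNat ∧ c.toNat ≤ 57 := by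
  rw [PySem.Int.toList_toStr]
  unfold PySem.Int.toChars
  rw [if_neg (by omega)]
  exact toDigitsCore_digits _ _ [] (by simp)

-- the per-digit values agree: A's product over range(1, k+1) equals B's table lookup, for k ≤ 9
theorem perDigit_eq (k : Nat) (hk : k ≤ 9) :
    (PySem.List.pyRange 1 ((k : Int) + 1) 1).foldl (fun value a => value * a) 1
      = (PySem.List.pyGet? FACT (k : Int)).getD 0 := by
  interval_cases k <;> decide

-- foldl-append builds the map
theorem foldl_append_map {α β : Type} (g : α → β) (l : List α) (acc : List β) :
    l.foldl (fun acc num => acc ++ [g num]) acc = acc ++ l.map g := by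
  induction l generalizing acc with
  | nil => simp
  | cons x xs ih => simp [List.foldl_cons, ih, List.append_assoc]

-- ===== VERDICT (by name: the statement is the Claim_ definition above) =====
theorem f_spec : Claim_equal_f := by
  intro n _ hn
  unfold Spec_f f f_alt
  simp only [foldl_append_map, List.nil_append, List.map_map]
  congr 1
  apply List.map_congr_left
  intro c hc
  obtain ⟨h1, h2⟩ := toStr_digits n hn c hc
  have : digitInt c = ((c.toNat - 48 : Nat) : Int) := by unfold digitInt; omega
  rw [Function.comp_apply, this, perDigit_eq (c.toNat - 48) (by omega)]
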